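-- pv_equiv track=rewrite | github.com/Jonathan-R-Anderson/FindingSystems | Tagging/Tagger.py | populateQueryDict
-- ===== SOURCE A (Python) =====
-- def populateQueryDict(queries, companies):
--     dict = {}
--     for company in companies:
--         dict[str(company[1])] = [company[0]]
--     for query in queries:
--         if(str(query[1]) in dict.keys()):
--             dict[str(query[1])].append(query[0])
--     return dict
-- ===== SOURCE B (Python) =====
-- def populateQueryDict(queries, companies):
--     # One pass over queries builds an index key -> list of query names;
--     # one pass over companies then emits each entry directly.
--     index = {}
--     for query in queries:
--         index.setdefault(str(query[1]), []).append(query[0])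
--     result = {}
--     for company in companies:
--         key = str(company[1])
--         result[key] = [company[0]] + index.get(key, [])
--     return result
-- ===== Notes on version B (the rewrite author's own statement) =====
-- stated objective: alternative
-- what changed: B first builds a query index (key -> list of query names) in one pass over queries, then emits each result entry directly in one pass over companies, instead of A's building a company dict and then mutating its lists while scanning queries; the lookup moves from the query loop to the company loop.
import Mathlib
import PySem

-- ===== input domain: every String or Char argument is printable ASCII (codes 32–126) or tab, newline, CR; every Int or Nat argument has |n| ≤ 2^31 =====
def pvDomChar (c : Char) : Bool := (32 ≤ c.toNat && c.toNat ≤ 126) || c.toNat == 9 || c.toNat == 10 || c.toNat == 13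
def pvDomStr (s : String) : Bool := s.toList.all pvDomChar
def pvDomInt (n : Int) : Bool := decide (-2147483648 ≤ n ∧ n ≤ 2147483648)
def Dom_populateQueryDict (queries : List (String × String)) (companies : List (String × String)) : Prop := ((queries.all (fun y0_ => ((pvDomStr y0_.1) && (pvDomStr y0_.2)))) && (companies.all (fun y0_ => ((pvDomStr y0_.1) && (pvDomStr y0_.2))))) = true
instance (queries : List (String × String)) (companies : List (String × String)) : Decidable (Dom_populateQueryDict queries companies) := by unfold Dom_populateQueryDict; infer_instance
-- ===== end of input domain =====

-- B builds a query index first and then emits each company entry directly (alternative decomposition, same cost).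
-- str(x) on a str argument is the identity, so the ports use the strings directly.

-- ===== PORT A =====
-- dict = {}; for company in companies: dict[company[1]] = [company[0]];
-- for query in queries: if query[1] in dict: dict[query[1]].append(query[0]); return dict
def populateQueryDict (queries : List (String × String)) (companies : List (String × String)) : List (String × List String) :=
  let d := companies.foldl (fun d c => d.insert c.2 [c.1]) (PySem.Dict.empty : PySem.Dict String (List String))
  let d := queries.foldl (fun d q => if d.contains q.2 then d.modify q.2 [] (· ++ [q.1]) else d) d
  d.items

-- ===== PORT B =====
-- index = {}; for query in queries: index.setdefault(query[1], []).append(query[0]);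
-- result = {}; for company in companies: result[company[1]] = [company[0]] + index.get(company[1], []); return result
def populateQueryDict_alt (queries : List (String × String)) (companies : List (String × String)) : List (String × List String) :=
  let idx := queries.foldl (fun m q => m.modify q.2 [] (· ++ [q.1])) (PySem.Dict.empty : PySem.Dict String (List String))
  let res := companies.foldl (fun d c => d.insert c.2 (c.1 :: idx.getD c.2 [])) (PySem.Dict.empty : PySem.Dict String (List String))
  res.items

-- ===== PRECONDITION & SPEC =====
def Spec_populateQueryDict (queries : List (String × String)) (companies : List (String × String)) (out : List (String × List String)) : Prop := out = populateQueryDict_alt queries companies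
instance (queries : List (String × String)) (companies : List (String × String)) (out : List (String × List String)) : Decidable (Spec_populateQueryDict queries companies out) := by unfold Spec_populateQueryDict; infer_instance

-- ===== CLAIM (what is proved, stated in full; the proofs are below) =====
def Claim_equal_populateQueryDict : Prop := ∀ (queries : List (String × String)) (companies : List (String × String)), Dom_populateQueryDict queries companies → Spec_populateQueryDict queries companies (populateQueryDict queries companies)

-- ===== LEMMAS AND PROOFS =====

-- the query names attached to key k, in order
def pvQs (queries : List (String × String)) (k : String) : List String :=
  (queries.filter (fun q => q.2 == k)).map (·.1)

-- the query index of B, looked up, yields exactly pvQs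
theorem pv_idx_getD (l : List (String × String)) (d : PySem.Dict String (List String)) (k : String) :
    (l.foldl (fun m q => m.modify q.2 [] (· ++ [q.1])) d).getD k [] = d.getD k [] ++ pvQs l k := by
  induction l generalizing d with
  | nil => simp [pvQs]
  | cons q t ih =>
    simp only [List.foldl_cons, ih, pvQs, List.filter_cons]
    by_cases h : q.2 = k
    · subst h
      simp [PySem.Dict.getD_modify_self]
    · rw [PySem.Dict.getD_modify_of_ne _ _ _ (fun hk => h (Eq.symm hk))]
      simp [h]

-- A's second loop rewrites every entry (k, v) of d to (k, v ++ pvQs l k)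
theorem pv_append_loop (l : List (String × String)) (d : PySem.Dict String (List String))
    (hnd : d.keys.Nodup) :
    (l.foldl (fun d q => if d.contains q.2 then d.modify q.2 [] (· ++ [q.1]) else d) d).items
      = d.items.map (fun p => (p.1, p.2 ++ pvQs l p.1)) := by
  induction l generalizing d with
  | nil =>
    simp only [List.foldl_nil, pvQs, List.filter_nil, List.map_nil, List.append_nil]
    have h : (fun p : String × List String => (p.1, p.2)) = id := funext (fun p => rfl)
    rw [h, List.map_id]
  | cons q t ih =>
    simp only [List.foldl_cons]
    by_cases hc : d.contains q.2
    · rw [if_pos hc]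
      have hnd' : (d.modify q.2 [] (· ++ [q.1])).keys.Nodup := by
        rw [PySem.Dict.keys_modify]
        rw [PySem.Dict.keys_insert_of_contains _ _ hc]
        exact hnd
      rw [ih _ hnd']
      show ((d.insert q.2 ((d.getD q.2 []) ++ [q.1])).items.map _) = _
      rw [PySem.Dict.items_insert_of_contains _ _ hc, List.map_map]
      apply List.map_congr_left
      intro p hp
      by_cases hk : p.1 = q.2
      · have hget : d.getD p.1 [] = p.2 := PySem.Dict.getD_of_mem_items d hp hnd []
        have hbe : (p.1 == q.2) = true := by simp [hk]
        simp only [Function.comp, hbe, if_pos, pvQs, List.filter_cons]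
        have hbe2 : (q.2 == p.1) = true := by simp [hk]
        simp [← hk, hget]
      · have : (p.1 == q.2) = false := by simp [hk]
        simp only [Function.comp, this, Bool.false_eq_true, if_false, pvQs, List.filter_cons]
        have h2 : (q.2 == p.1) = false := by simp; exact fun h => hk (Eq.symm h)
        simp [h2]
    · rw [if_neg hc, ih _ hnd]
      apply List.map_congr_left
      intro p hp
      have hne : p.1 ≠ q.2 := by
        intro h
        exact hc ((PySem.Dict.contains_iff_mem_keys d q.2).mpr
          (h ▸ PySem.Dict.mem_keys_of_mem_items _ hp))
      have h2 : (q.2 == p.1) = false := by simp; exact fun h => hne (Eq.symm h)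
      simp [pvQs, h2]

-- B's company loop relates to A's company loop entrywise: inserting c.1 :: g c.2 instead of [c.1]
-- keeps the items in lockstep under the map (k, v) ↦ (k, v ++ g k).
theorem pv_company_loop (g : String → List String) (l : List (String × String))
    (d e : PySem.Dict String (List String))
    (he : e.items = d.items.map (fun p => (p.1, p.2 ++ g p.1))) :
    (l.foldl (fun d c => d.insert c.2 (c.1 :: g c.2)) e).items
      = (l.foldl (fun d c => d.insert c.2 [c.1]) d).items.map (fun p => (p.1, p.2 ++ g p.1)) := by
  induction l generalizing d e with
  | nil => simpa using he
  | cons c t ih =>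
    simp only [List.foldl_cons]
    apply ih
    have hkeys : e.keys = d.keys := by
      simp only [PySem.Dict.keys, he, List.map_map]
      rfl
    have hcont : e.contains c.2 = d.contains c.2 := by
      rw [PySem.Dict.contains_eq_decide_mem_keys, PySem.Dict.contains_eq_decide_mem_keys, hkeys]
    by_cases hc : d.contains c.2
    · rw [PySem.Dict.items_insert_of_contains _ _ (hcont ▸ hc),
        PySem.Dict.items_insert_of_contains _ _ hc, he, List.map_map, List.map_map]
      apply List.map_congr_left
      intro p _
      by_cases hk : p.1 = c.2 <;> simp [Function.comp, hk]
    · rw [PySem.Dict.items_insert_of_not_contains _ _ (by simpa [hcont] using hc),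
        PySem.Dict.items_insert_of_not_contains _ _ (by simpa using hc), he]
      simp

-- ===== VERDICT (by name: the statement is the Claim_ definition above) =====
theorem populateQueryDict_spec : Claim_equal_populateQueryDict := by
  intro queries companies _
  unfold Spec_populateQueryDict populateQueryDict populateQueryDict_alt
  have hnd : ((companies.foldl (fun d c => d.insert c.2 [c.1])
      (PySem.Dict.empty : PySem.Dict String (List String))).keys).Nodup :=
    PySem.Dict.nodup_keys_foldl_insert_key companies (fun c => c.2) (fun _ c => [c.1]) _
      PySem.Dict.nodup_keys_empty
  rw [pv_append_loop _ _ hnd]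
  have hidx : ∀ k, (queries.foldl (fun m q => m.modify q.2 [] (· ++ [q.1]))
      (PySem.Dict.empty : PySem.Dict String (List String))).getD k [] = pvQs queries k := by
    intro k; rw [pv_idx_getD]; simp
  have := pv_company_loop (fun k => pvQs queries k) companies
    (PySem.Dict.empty : PySem.Dict String (List String))
    (PySem.Dict.empty : PySem.Dict String (List String)) rfl
  simp only [hidx]
  exact this.symm
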